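-- pv_equiv track=rewrite | github.com/marcelnoehre/advent-of-code | year2018/day02/python/solution.py | part_2
-- ===== SOURCE A (Python) =====
-- def part_2(input):
--     for x in range(len(input)):
--         for y in range(len(input)):
--             if x != y and len(input[x]) == len(input[y]):
--                 difference, position = 0, 0
--
--                 for z in range(len(input[x])):
--                     if input[x][z] != input[y][z]:
--                         position, difference = z, difference + 1
--
--                 if difference == 1:
--                     return (input[x][:position] + input[x][position + 1:]).rstrip()
-- ===== SOURCE B (Python) =====
-- def part_2(input):
--     # Hash index: for every string and position, key = (position, string with that
--     # char removed). Two same-length strings differ in exactly one char iff they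
--     # share such a key and their chars at that position differ.
--     index = {}
--     for i in range(len(input)):
--         s = input[i]
--         for z in range(len(s)):
--             index.setdefault((z, s[:z], s[z + 1:]), []).append(i)
--     for x in range(len(input)):
--         s = input[x]
--         best = None
--         for z in range(len(s)):
--             for y in index.get((z, s[:z], s[z + 1:]), []):
--                 if y != x and input[y][z] != s[z]:
--                     if best is None or y < best[0]:
--                         best = (y, z)
--         if best is not None:
--             z = best[1]
--             return (s[:z] + s[z + 1:]).rstrip()
-- ===== Notes on version B (the rewrite author's own statement) =====
-- stated objective: faster
-- what changed: Replaces A's all-pairs scan (compare every pair of strings character by character) with a hash index mapping per-position wildcard keys (position, string with that character removed) to the indices holding them, queried once per position of each string.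
import Mathlib
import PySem

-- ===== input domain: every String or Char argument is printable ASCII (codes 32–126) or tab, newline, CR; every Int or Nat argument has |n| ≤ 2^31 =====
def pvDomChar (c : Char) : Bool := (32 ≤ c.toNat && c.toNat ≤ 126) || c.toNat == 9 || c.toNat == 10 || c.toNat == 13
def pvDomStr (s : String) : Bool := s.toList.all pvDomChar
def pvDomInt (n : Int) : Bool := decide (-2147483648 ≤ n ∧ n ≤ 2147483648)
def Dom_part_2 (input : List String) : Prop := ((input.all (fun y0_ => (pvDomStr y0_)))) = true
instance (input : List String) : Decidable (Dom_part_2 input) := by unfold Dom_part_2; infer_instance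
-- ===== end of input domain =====

-- B replaces A's O(n²·L) all-pairs scan by a hash index of per-position wildcard keys
-- (position, string with that char removed), queried once per string: objective 'faster'.

-- string at index i, as a char list (every access in both programs is in range, so getD is exact)
def pvStrAt (input : List String) (i : Nat) : List Char := (input.getD i "").toList

-- (input[x][:p] + input[x][p+1:]).rstrip() — the returned value, identical expression in A and B
def pvValA (s : List Char) (p : Nat) : String :=
  String.ofList (PySem.Chars.rstrip (s.take p ++ s.drop (p + 1)))

-- ===== PORT A =====
-- inner z-loop of A: state (difference, position), position updated to the last differing z
def pvDiffA (s t : List Char) : Nat × Nat :=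
  (List.range s.length).foldl (fun dp z => if s[z]? ≠ t[z]? then (dp.1 + 1, z) else dp) (0, 0)

def part_2 (input : List String) : Option String :=
  (List.range input.length).findSome? fun x =>
    (List.range input.length).findSome? fun y =>
      if x ≠ y ∧ (pvStrAt input x).length = (pvStrAt input y).length then
        if (pvDiffA (pvStrAt input x) (pvStrAt input y)).1 = 1 then
          some (pvValA (pvStrAt input x) (pvDiffA (pvStrAt input x) (pvStrAt input y)).2)
        else none
      else none

-- ===== PORT B =====
-- wildcard key of s at position z: (z, s[:z], s[z+1:])
def pvKey (s : List Char) (z : Nat) : Nat × List Char × List Char := (z, s.take z, s.drop (z + 1))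

-- index = {}; for i: for z: index.setdefault(key, []).append(i)
def pvIndex (input : List String) : PySem.Dict (Nat × List Char × List Char) (List Nat) :=
  (List.range input.length).foldl
    (fun d i =>
      (List.range (pvStrAt input i).length).foldl
        (fun d z => d.modify (pvKey (pvStrAt input i) z) [] (· ++ [i])) d)
    PySem.Dict.empty

-- body of B's candidate loop: keep the candidate with the smallest index y
def pvStep (input : List String) (x : Nat) (best : Option (Nat × Nat)) (c : Nat × Nat) :
    Option (Nat × Nat) :=
  if c.1 ≠ x ∧ (pvStrAt input c.1)[c.2]? ≠ (pvStrAt input x)[c.2]? then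
    match best with
    | none => some c
    | some b => if c.1 < b.1 then some c else some b
  else best

-- best = None; for z: for y in index.get(key, []): …
def pvBest (input : List String) (x : Nat) : Option (Nat × Nat) :=
  (List.range (pvStrAt input x).length).foldl
    (fun best z =>
      ((pvIndex input).getD (pvKey (pvStrAt input x) z) []).foldl
        (fun best y => pvStep input x best (y, z)) best)
    none

def part_2_alt (input : List String) : Option String :=
  (List.range input.length).findSome? fun x =>
    match pvBest input x with
    | some b => some (pvValA (pvStrAt input x) b.2)
    | none => none

-- ===== PRECONDITION & SPEC =====
def Spec_part_2 (input : List String) (out : Option String) : Prop := out = part_2_alt input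
instance (input : List String) (out : Option String) : Decidable (Spec_part_2 input out) := by unfold Spec_part_2; infer_instance

-- ===== CLAIM (what is proved, stated in full; the proofs are below) =====
def Claim_equal_part_2 : Prop := ∀ (input : List String), Dom_part_2 input → Spec_part_2 input (part_2 input)

-- ===== LEMMAS AND PROOFS =====

-- positions where s and t differ (within range of s)
def pvMism (s t : List Char) : List Nat :=
  (List.range s.length).filter fun z => decide (s[z]? ≠ t[z]?)

-- the semantic match relation: y names a string of equal length differing from x's in exactly position z
def pvM (input : List String) (x y z : Nat) : Prop :=
  y ≠ x ∧ (pvStrAt input x).length = (pvStrAt input y).length ∧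
    pvMism (pvStrAt input x) (pvStrAt input y) = [z]

-- flattened (key, index) pairs fed to the dictionary
def pvPairs (input : List String) : List ((Nat × List Char × List Char) × Nat) :=
  (List.range input.length).flatMap fun i =>
    (List.range (pvStrAt input i).length).map fun z => (pvKey (pvStrAt input i) z, i)

-- flattened candidate traversal of pvBest
def pvCands (input : List String) (x : Nat) : List (Nat × Nat) :=
  (List.range (pvStrAt input x).length).flatMap fun z =>
    ((pvIndex input).getD (pvKey (pvStrAt input x) z) []).map fun y => (y, z)

lemma pvGetLast_cons_getD : ∀ (l : List Nat) (a pos : Nat),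
    (a :: l).getLast?.getD pos = l.getLast?.getD a := by
  intro l
  induction l with
  | nil => intro a pos; rfl
  | cons b t ih =>
    intro a pos
    rw [List.getLast?_cons_cons, ih b pos, ih b a]

lemma pvDiffA_foldl (p : Nat → Prop) [DecidablePred p] :
    ∀ (l : List Nat) (d pos : Nat),
      l.foldl (fun dp z => if p z then (dp.1 + 1, z) else dp) (d, pos)
        = (d + (l.filter fun z => decide (p z)).length,
           ((l.filter fun z => decide (p z)).getLast?).getD pos) := by
  intro l
  induction l with
  | nil => intro d pos; simp
  | cons a l ih =>
    intro d pos
    simp only [List.foldl_cons, List.filter_cons]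
    by_cases h : p a
    · simp only [h, if_pos, decide_true, List.length_cons, ih, pvGetLast_cons_getD]
      exact Prod.ext (by omega) rfl
    · simp [h, ih]

lemma pvFilter_range_eq_singleton (p : Nat → Prop) [DecidablePred p] (n z : Nat) :
    ((List.range n).filter fun w => decide (p w)) = [z] ↔
      p z ∧ z < n ∧ ∀ w, w < n → w ≠ z → ¬ p w := by
  constructor
  · intro h
    have hz : z ∈ (List.range n).filter fun w => decide (p w) := by rw [h]; simp
    rw [List.mem_filter, List.mem_range] at hz
    refine ⟨by simpa using hz.2, hz.1, ?_⟩
    intro w hw hne hp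
    have : w ∈ (List.range n).filter fun w => decide (p w) := by
      rw [List.mem_filter, List.mem_range]; exact ⟨hw, by simpa using hp⟩
    rw [h] at this
    simp at this
    exact hne this
  · rintro ⟨hp, hz, hall⟩
    have hnd : ((List.range n).filter fun w => decide (p w)).Nodup :=
      (List.nodup_range).filter _
    have hmem : z ∈ (List.range n).filter fun w => decide (p w) := by
      rw [List.mem_filter, List.mem_range]; exact ⟨hz, by simpa using hp⟩
    have hsub : ∀ w ∈ (List.range n).filter fun w => decide (p w), w = z := by
      intro w hw
      rw [List.mem_filter, List.mem_range] at hw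
      by_contra hne
      exact hall w hw.1 hne (by simpa using hw.2)
    cases hf : (List.range n).filter fun w => decide (p w) with
    | nil => rw [hf] at hmem; simp at hmem
    | cons a t =>
      rw [hf] at hsub hnd
      have ha : a = z := hsub a (by simp)
      have ht : t = [] := by
        cases ht' : t with
        | nil => rfl
        | cons b u =>
          have hb : b = z := hsub b (by simp [ht'])
          rw [ht'] at hnd
          simp [ha, hb] at hnd
      rw [ha, ht]

lemma pvMatch (s t : List Char) (z : Nat) (h1 : z < s.length) (h2 : z < t.length) :
    (pvKey t z = pvKey s z ∧ t[z]? ≠ s[z]?) ↔ (s.length = t.length ∧ pvMism s t = [z]) := by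
  unfold pvKey pvMism
  constructor
  · rintro ⟨hkey, hne⟩
    have htake : t.take z = s.take z := congrArg (fun p => p.2.1) hkey
    have hdrop : t.drop (z + 1) = s.drop (z + 1) := congrArg (fun p => p.2.2) hkey
    have hlen : s.length = t.length := by
      have h1' := congrArg List.length hdrop
      simp only [List.length_drop] at h1'
      omega
    refine ⟨hlen, (pvFilter_range_eq_singleton _ _ _).2 ⟨fun h => hne (by rw [h]), h1, ?_⟩⟩
    intro w hw hwz
    simp only [not_not, ne_eq]
    rcases Nat.lt_or_ge w z with hlt | hge
    · have := congrArg (fun l => l[w]?) htake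
      simpa [List.getElem?_take, hlt] using this.symm
    · have hgt : z + 1 ≤ w := by omega
      have := congrArg (fun l => l[w - (z+1)]?) hdrop
      simp only [List.getElem?_drop] at this
      rw [Nat.add_sub_cancel' hgt] at this
      exact this.symm
  · rintro ⟨hlen, hm⟩
    rw [pvFilter_range_eq_singleton] at hm
    obtain ⟨hpz, _, hall⟩ := hm
    have hagree : ∀ w, w ≠ z → s[w]? = t[w]? := by
      intro w hwz
      rcases Nat.lt_or_ge w s.length with hw | hw
      · have := hall w hw hwz
        simpa using this
      · rw [List.getElem?_eq_none hw, List.getElem?_eq_none (by omega)]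
    refine ⟨?_, fun h => hpz h.symm⟩
    refine Prod.ext rfl (Prod.ext ?_ ?_)
    · apply List.ext_getElem?
      intro m
      simp only [List.getElem?_take]
      split
      · next hm' => exact (hagree m (by omega)).symm
      · rfl
    · apply List.ext_getElem?
      intro m
      simp only [List.getElem?_drop]
      exact (hagree (z + 1 + m) (by omega)).symm

lemma pvIndex_getD (input : List String) (k : Nat × List Char × List Char) :
    (pvIndex input).getD k [] = ((pvPairs input).filter fun p => p.1 == k).map (·.2) := by
  have h : pvIndex input
      = (pvPairs input).foldl (fun d p => d.modify p.1 [] (· ++ [p.2])) PySem.Dict.empty := by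
    unfold pvIndex pvPairs
    rw [List.foldl_flatMap]
    congr 1
    funext d i
    rw [List.foldl_map]
  rw [h, PySem.Dict.getD_foldl_modify_append]
  simp

lemma pvBucket_mem (input : List String) (x z y : Nat) :
    y ∈ (pvIndex input).getD (pvKey (pvStrAt input x) z) [] ↔
      y < input.length ∧ z < (pvStrAt input y).length ∧
        pvKey (pvStrAt input y) z = pvKey (pvStrAt input x) z := by
  rw [pvIndex_getD]
  simp only [List.mem_map, List.mem_filter, pvPairs, List.mem_flatMap, List.mem_range]
  constructor
  · rintro ⟨p, ⟨⟨i, hi, ⟨z', hz', hkz⟩⟩, hk⟩, rfl⟩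
    rw [← hkz] at hk ⊢
    have hk' : pvKey (pvStrAt input i) z' = pvKey (pvStrAt input x) z := by simpa using hk
    have hz : z' = z := congrArg Prod.fst hk'
    subst hz
    exact ⟨hi, hz', hk'⟩
  · rintro ⟨hy, hz, hk⟩
    exact ⟨(pvKey (pvStrAt input y) z, y), ⟨⟨y, hy, z, hz, rfl⟩, by simpa using hk⟩, rfl⟩

-- candidate ↔ semantic match
lemma pvCands_iff (input : List String) (x y z : Nat) :
    ((y, z) ∈ pvCands input x ∧
        (y ≠ x ∧ (pvStrAt input y)[z]? ≠ (pvStrAt input x)[z]?)) ↔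
      (y < input.length ∧ pvM input x y z) := by
  unfold pvCands pvM
  simp only [List.mem_flatMap, List.mem_map, List.mem_range]
  constructor
  · rintro ⟨⟨z', hz', y', hy', hp⟩, hyx, hne⟩
    obtain ⟨h1, h2⟩ : y' = y ∧ z' = z :=
      ⟨congrArg Prod.fst hp, congrArg Prod.snd hp⟩
    rw [h1] at hy'
    rw [h2] at hy' hz'
    rw [pvBucket_mem] at hy'
    obtain ⟨hy, hzy, hkey⟩ := hy'
    have := (pvMatch (pvStrAt input x) (pvStrAt input y) z hz' hzy).1 ⟨hkey, hne⟩
    exact ⟨hy, hyx, this.1, this.2⟩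
  · rintro ⟨hy, hyx, hlen, hm⟩
    have hz : z < (pvStrAt input x).length ∧ (pvStrAt input x)[z]? ≠ (pvStrAt input y)[z]? := by
      have := (pvFilter_range_eq_singleton _ _ _).1 hm
      exact ⟨this.2.1, this.1⟩
    have hzy : z < (pvStrAt input y).length := by omega
    have := (pvMatch (pvStrAt input x) (pvStrAt input y) z hz.1 hzy).2 ⟨hlen, hm⟩
    refine ⟨⟨z, hz.1, y, ?_, rfl⟩, hyx, fun h => hz.2 h.symm⟩
    rw [pvBucket_mem]
    exact ⟨hy, hzy, this.1⟩

lemma pvBest_eq_foldl (input : List String) (x : Nat) :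
    pvBest input x = (pvCands input x).foldl (pvStep input x) none := by
  unfold pvBest pvCands
  rw [List.foldl_flatMap]
  congr 1
  funext best z
  rw [List.foldl_map]

lemma pvFoldMin_cases (input : List String) (x : Nat) (L : List (Nat × Nat)) :
    (L.foldl (pvStep input x) none = none ∧
        ∀ c ∈ L, ¬ (c.1 ≠ x ∧ (pvStrAt input c.1)[c.2]? ≠ (pvStrAt input x)[c.2]?)) ∨
      (∃ b, L.foldl (pvStep input x) none = some b ∧
        (b.1 ≠ x ∧ (pvStrAt input b.1)[b.2]? ≠ (pvStrAt input x)[b.2]?) ∧ b ∈ L ∧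
        ∀ c ∈ L, (c.1 ≠ x ∧ (pvStrAt input c.1)[c.2]? ≠ (pvStrAt input x)[c.2]?) → b.1 ≤ c.1) := by
  induction L using List.reverseRecOn with
  | nil => exact Or.inl ⟨rfl, by simp⟩
  | append_singleton L c ih =>
    rw [List.foldl_append, List.foldl_cons, List.foldl_nil]
    rcases ih with ⟨hr, hall⟩ | ⟨b, hr, hcb, hbL, hmin⟩
    · rw [hr]
      by_cases hc : c.1 ≠ x ∧ (pvStrAt input c.1)[c.2]? ≠ (pvStrAt input x)[c.2]?
      · refine Or.inr ⟨c, by simp [pvStep, hc], hc, by simp, ?_⟩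
        intro c' hc' hcond
        rcases List.mem_append.1 hc' with h' | h'
        · exact absurd hcond (hall c' h')
        · simp at h'; subst h'; exact le_refl _
      · refine Or.inl ⟨by simp [pvStep, hc], ?_⟩
        intro c' hc'
        rcases List.mem_append.1 hc' with h' | h'
        · exact hall c' h'
        · simp at h'; subst h'; exact hc
    · rw [hr]
      by_cases hc : c.1 ≠ x ∧ (pvStrAt input c.1)[c.2]? ≠ (pvStrAt input x)[c.2]?
      · by_cases hlt : c.1 < b.1
        · refine Or.inr ⟨c, by simp [pvStep, hc, hlt], hc, by simp, ?_⟩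
          intro c' hc' hcond
          rcases List.mem_append.1 hc' with h' | h'
          · have := hmin c' h' hcond; omega
          · simp at h'; subst h'; exact le_refl _
        · refine Or.inr ⟨b, by simp [pvStep, hc, hlt], hcb, by simp [hbL], ?_⟩
          intro c' hc' hcond
          rcases List.mem_append.1 hc' with h' | h'
          · exact hmin c' h' hcond
          · simp at h'; subst h'; omega
      · refine Or.inr ⟨b, by simp [pvStep, hc], hcb, by simp [hbL], ?_⟩
        intro c' hc' hcond
        rcases List.mem_append.1 hc' with h' | h'
        · exact hmin c' h' hcond
        · simp at h'; subst h'; exact absurd hcond hc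

-- A's inner test, characterised
lemma pvInnerA_some (input : List String) (x y : Nat) (v : String) :
    (if x ≠ y ∧ (pvStrAt input x).length = (pvStrAt input y).length then
        if (pvDiffA (pvStrAt input x) (pvStrAt input y)).1 = 1 then
          some (pvValA (pvStrAt input x) (pvDiffA (pvStrAt input x) (pvStrAt input y)).2)
        else none
      else none) = some v ↔
      ∃ z, pvM input x y z ∧ v = pvValA (pvStrAt input x) z := by
  have hdiff : pvDiffA (pvStrAt input x) (pvStrAt input y)
      = ((pvMism (pvStrAt input x) (pvStrAt input y)).length,
         ((pvMism (pvStrAt input x) (pvStrAt input y)).getLast?).getD 0) := by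
    unfold pvDiffA pvMism
    simpa using pvDiffA_foldl (fun z => (pvStrAt input x)[z]? ≠ (pvStrAt input y)[z]?)
      (List.range (pvStrAt input x).length) 0 0
  split_ifs with h1 h2
  · rw [hdiff] at h2 ⊢
    simp only at h2
    obtain ⟨z, hz⟩ := List.length_eq_one_iff.1 h2
    simp only [Option.some.injEq]
    constructor
    · intro hv
      refine ⟨z, ⟨Ne.symm h1.1, h1.2, hz⟩, ?_⟩
      rw [hz] at hv
      simpa using hv.symm
    · rintro ⟨z', ⟨_, _, hm⟩, hv⟩
      rw [hm] at hz
      obtain rfl : z' = z := by simpa using hz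
      rw [hm]
      simpa using hv.symm
  · simp only [false_iff, not_exists]
    rintro z ⟨⟨_, _, hm⟩, _⟩
    rw [hdiff] at h2
    simp only at h2
    rw [hm] at h2
    exact h2 rfl
  · simp only [false_iff, not_exists]
    rintro z ⟨⟨hyx, hlen, _⟩, _⟩
    exact h1 ⟨Ne.symm hyx, hlen⟩

lemma pvFindSome_first {α : Type} (f : Nat → Option α) (n y0 : Nat) (v : α)
    (hy : y0 < n) (hf : f y0 = some v) (hmin : ∀ w, w < y0 → f w = none) :
    (List.range n).findSome? f = some v := by
  induction n with
  | zero => omega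
  | succ n ih =>
    rw [List.range_succ, List.findSome?_append]
    rcases Nat.lt_or_ge y0 n with h | h
    · rw [ih h]
      rfl
    · have hy0 : y0 = n := by omega
      subst hy0
      have : (List.range y0).findSome? f = none := by
        rw [List.findSome?_eq_none_iff]
        intro a ha
        exact hmin a (List.mem_range.1 ha)
      rw [this]
      simpa using hf

lemma pvInner_eq (input : List String) (x : Nat) :
    ((List.range input.length).findSome? fun y =>
      if x ≠ y ∧ (pvStrAt input x).length = (pvStrAt input y).length then
        if (pvDiffA (pvStrAt input x) (pvStrAt input y)).1 = 1 then
          some (pvValA (pvStrAt input x) (pvDiffA (pvStrAt input x) (pvStrAt input y)).2)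
        else none
      else none) =
    (match pvBest input x with
     | some b => some (pvValA (pvStrAt input x) b.2)
     | none => none) := by
  rw [pvBest_eq_foldl]
  rcases pvFoldMin_cases input x (pvCands input x) with ⟨hb, hall⟩ | ⟨b, hb, hcb, hbL, hmin⟩
  · rw [hb]
    rw [List.findSome?_eq_none_iff]
    intro y hy
    cases hfy : (if x ≠ y ∧ (pvStrAt input x).length = (pvStrAt input y).length then
        if (pvDiffA (pvStrAt input x) (pvStrAt input y)).1 = 1 then
          some (pvValA (pvStrAt input x) (pvDiffA (pvStrAt input x) (pvStrAt input y)).2)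
        else none
      else none) with
    | none => rfl
    | some v =>
      obtain ⟨z, hm, _⟩ := (pvInnerA_some input x y v).1 hfy
      have hc := (pvCands_iff input x y z).2 ⟨List.mem_range.1 hy, hm⟩
      exact absurd hc.2 (hall (y, z) hc.1)
  · rw [hb]
    obtain ⟨hy, hm⟩ : b.1 < input.length ∧ pvM input x b.1 b.2 := by
      have := (pvCands_iff input x b.1 b.2).1 ⟨by simpa using hbL, by simpa using hcb⟩
      exact this
    refine pvFindSome_first _ _ b.1 _ hy ?_ ?_
    · exact (pvInnerA_some input x b.1 _).2 ⟨b.2, hm, rfl⟩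
    · intro w hw
      cases hfw : (if x ≠ w ∧ (pvStrAt input x).length = (pvStrAt input w).length then
          if (pvDiffA (pvStrAt input x) (pvStrAt input w)).1 = 1 then
            some (pvValA (pvStrAt input x) (pvDiffA (pvStrAt input x) (pvStrAt input w)).2)
          else none
        else none) with
      | none => rfl
      | some u =>
        obtain ⟨z, hmw, _⟩ := (pvInnerA_some input x w u).1 hfw
        have hc := (pvCands_iff input x w z).2 ⟨by omega, hmw⟩
        have := hmin (w, z) hc.1 hc.2
        simp at this
        omega

lemma pvFindSome_congr {α β : Type} (l : List α) (f g : α → Option β)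
    (h : ∀ a ∈ l, f a = g a) : l.findSome? f = l.findSome? g := by
  induction l with
  | nil => rfl
  | cons a l ih =>
    simp only [List.findSome?_cons, h a (by simp)]
    cases g a with
    | none => exact ih fun b hb => h b (by simp [hb])
    | some v => rfl

-- ===== VERDICT (by name: the statement is the Claim_ definition above) =====
theorem part_2_spec : Claim_equal_part_2 := by
  intro input _
  unfold Spec_part_2 part_2 part_2_alt
  exact pvFindSome_congr _ _ _ (fun x _ => pvInner_eq input x)
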